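-- pv_equiv track=rewrite | github.com/avin0160/context-aware-doc-generator | comprehensive_docs_hardcoded_old.py | generate_return_description
-- ===== SOURCE A (Python) =====
-- def generate_return_description(func_name: str) -> str:
--     """Generate return value description"""
--     name_lower = func_name.lower()
--
--     if any(word in name_lower for word in ['create', 'insert', 'add']):
--         return "Success status of the operation"
--     elif any(word in name_lower for word in ['get', 'find', 'search']):
--         return "Retrieved data or None if not found"
--     elif any(word in name_lower for word in ['list', 'all']):
--         return "List of matching items"
--     elif any(word in name_lower for word in ['count', 'size']):
--         return "Numeric count or size value"
--     elif any(word in name_lower for word in ['delete', 'remove']):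
--         return "True if deletion successful"
--     else:
--         return "Operation result"
-- ===== SOURCE B (Python) =====
-- KEYWORD_PRIO = [
--     ('create', 0), ('insert', 0), ('add', 0),
--     ('get', 1), ('find', 1), ('search', 1),
--     ('list', 2), ('all', 2),
--     ('count', 3), ('size', 3),
--     ('delete', 4), ('remove', 4),
-- ]
--
-- DESCS = [
--     "Success status of the operation",
--     "Retrieved data or None if not found",
--     "List of matching items",
--     "Numeric count or size value",
--     "True if deletion successful",
--     "Operation result",
-- ]
--
--
-- def generate_return_description(func_name: str) -> str:
--     """Generate return value description"""
--     name = func_name.lower()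
--     best = 5  # index of the default description; lower index = higher priority
--     for i in range(len(name)):
--         for word, prio in KEYWORD_PRIO:
--             if prio < best and name.startswith(word, i):
--                 best = prio
--     return DESCS[best]
-- ===== Notes on version B (the rewrite author's own statement) =====
-- stated objective: alternative
-- what changed: Instead of an if/elif chain of per-group substring-containment tests, B slides once over the positions of the lowered name, matching each keyword with startswith at that position against a keyword-to-priority table, and keeps the minimum priority, which indexes into a description array.
import Mathlib
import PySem

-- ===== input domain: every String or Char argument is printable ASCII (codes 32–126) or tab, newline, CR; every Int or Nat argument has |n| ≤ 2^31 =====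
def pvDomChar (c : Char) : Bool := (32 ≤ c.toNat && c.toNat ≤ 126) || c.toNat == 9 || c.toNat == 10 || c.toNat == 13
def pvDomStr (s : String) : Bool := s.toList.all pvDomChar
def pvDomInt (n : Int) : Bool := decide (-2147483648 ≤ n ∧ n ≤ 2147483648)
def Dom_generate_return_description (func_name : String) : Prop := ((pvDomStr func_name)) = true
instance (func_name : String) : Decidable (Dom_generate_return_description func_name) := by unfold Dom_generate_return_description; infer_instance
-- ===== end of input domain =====

-- B replaces A's if/elif chain of substring-containment group tests by a single positional scan
-- with startswith against a keyword→priority table, keeping the minimum priority (alternative).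

-- ===== PORT A =====
def generate_return_description (func_name : String) : String :=
  let name_lower := PySem.Str.lower func_name
  if ["create", "insert", "add"].any (fun word => PySem.Str.isIn word name_lower) then
    "Success status of the operation"
  else if ["get", "find", "search"].any (fun word => PySem.Str.isIn word name_lower) then
    "Retrieved data or None if not found"
  else if ["list", "all"].any (fun word => PySem.Str.isIn word name_lower) then
    "List of matching items"
  else if ["count", "size"].any (fun word => PySem.Str.isIn word name_lower) then
    "Numeric count or size value"
  else if ["delete", "remove"].any (fun word => PySem.Str.isIn word name_lower) then
    "True if deletion successful"
  else
    "Operation result"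

-- ===== PORT B =====
def pvKeywordPrio : List (String × Int) :=
  [("create", 0), ("insert", 0), ("add", 0),
   ("get", 1), ("find", 1), ("search", 1),
   ("list", 2), ("all", 2),
   ("count", 3), ("size", 3),
   ("delete", 4), ("remove", 4)]

def pvDescs : List String :=
  ["Success status of the operation",
   "Retrieved data or None if not found",
   "List of matching items",
   "Numeric count or size value",
   "True if deletion successful",
   "Operation result"]

-- name.startswith(word, i) with 0 ≤ i ≤ len(name): exact as a prefix test of the suffix from i
-- (PySem.Str.startswith takes no start argument, so this one call is ported by hand via drop).
def pvStartsAt (cs : List Char) (i : Int) (w : String) : Bool :=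
  PySem.Chars.startswith (cs.drop i.toNat) w.toList

-- the two nested 'for' loops of Source B (best-accumulator scan), as folds over the same state
def pvScan (cs : List Char) : Int :=
  (PySem.List.pyRange 0 (cs.length) 1).foldl (fun best i =>
    pvKeywordPrio.foldl (fun best wp =>
      if wp.2 < best && pvStartsAt cs i wp.1 then wp.2 else best) best) 5

def generate_return_description_alt (func_name : String) : String :=
  let name := (PySem.Str.lower func_name).toList
  let best := pvScan name
  -- best always lies in [0,5] (proved below), so Python's DESCS[best] never raises
  -- and pyGetD's default is unreachable.
  PySem.List.pyGetD pvDescs best ""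

-- ===== PRECONDITION & SPEC =====
def Spec_generate_return_description (func_name : String) (out : String) : Prop := out = generate_return_description_alt func_name
instance (func_name : String) (out : String) : Decidable (Spec_generate_return_description func_name out) := by unfold Spec_generate_return_description; infer_instance

-- ===== CLAIM (what is proved, stated in full; the proofs are below) =====
def Claim_equal_generate_return_description : Prop := ∀ (func_name : String), Dom_generate_return_description func_name → Spec_generate_return_description func_name (generate_return_description func_name)

-- ===== LEMMAS AND PROOFS =====

-- inner fold over the rule table: never increases, bounded by every matched priority,
-- and either unchanged or equal to some matched priority
theorem pv_inner_spec (cs : List Char) (i : Int) (rules : List (String × Int)) :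
    ∀ (b : Int),
    (rules.foldl (fun best wp =>
        if wp.2 < best && pvStartsAt cs i wp.1 then wp.2 else best) b) ≤ b ∧
    (∀ wp ∈ rules, pvStartsAt cs i wp.1 = true →
        (rules.foldl (fun best wp =>
          if wp.2 < best && pvStartsAt cs i wp.1 then wp.2 else best) b) ≤ wp.2) ∧
    ((rules.foldl (fun best wp =>
        if wp.2 < best && pvStartsAt cs i wp.1 then wp.2 else best) b) = b ∨
      ∃ wp ∈ rules, pvStartsAt cs i wp.1 = true ∧
        (rules.foldl (fun best wp =>
          if wp.2 < best && pvStartsAt cs i wp.1 then wp.2 else best) b) = wp.2) := by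
  induction rules with
  | nil => intro b; simp
  | cons hd tl ih =>
    intro b
    simp only [List.foldl_cons]
    by_cases h : (hd.2 < b && pvStartsAt cs i hd.1) = true
    · rw [if_pos h]
      obtain ⟨h1, h2, h3⟩ := ih hd.2
      simp only [Bool.and_eq_true, decide_eq_true_eq] at h
      refine ⟨by omega, ?_, ?_⟩
      · intro wp hm hs
        rcases List.mem_cons.mp hm with hm | hm
        · subst hm; exact h1
        · exact h2 wp hm hs
      · rcases h3 with h3 | ⟨wp, hm, hs, he⟩
        · exact Or.inr ⟨hd, List.mem_cons_self, h.2, h3⟩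
        · exact Or.inr ⟨wp, List.mem_cons_of_mem _ hm, hs, he⟩
    · rw [if_neg h]
      obtain ⟨h1, h2, h3⟩ := ih b
      simp only [Bool.and_eq_true, decide_eq_true_eq, not_and] at h
      refine ⟨h1, ?_, ?_⟩
      · intro wp hm hs
        rcases List.mem_cons.mp hm with hm | hm
        · subst hm
          by_cases hlt : wp.2 < b
          · exact absurd hs (by simpa using h hlt)
          · omega
        · exact h2 wp hm hs
      · rcases h3 with h3 | ⟨wp, hm, hs, he⟩
        · exact Or.inl h3
        · exact Or.inr ⟨wp, List.mem_cons_of_mem _ hm, hs, he⟩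

-- outer fold over an arbitrary index list, same three properties
theorem pv_outer_spec (cs : List Char) (idxs : List Int) :
    ∀ (b : Int),
    (idxs.foldl (fun best i =>
        pvKeywordPrio.foldl (fun best wp =>
          if wp.2 < best && pvStartsAt cs i wp.1 then wp.2 else best) best) b) ≤ b ∧
    (∀ i ∈ idxs, ∀ wp ∈ pvKeywordPrio, pvStartsAt cs i wp.1 = true →
        (idxs.foldl (fun best i =>
          pvKeywordPrio.foldl (fun best wp =>
            if wp.2 < best && pvStartsAt cs i wp.1 then wp.2 else best) best) b) ≤ wp.2) ∧
    ((idxs.foldl (fun best i =>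
        pvKeywordPrio.foldl (fun best wp =>
          if wp.2 < best && pvStartsAt cs i wp.1 then wp.2 else best) best) b) = b ∨
      ∃ i ∈ idxs, ∃ wp ∈ pvKeywordPrio, pvStartsAt cs i wp.1 = true ∧
        (idxs.foldl (fun best i =>
          pvKeywordPrio.foldl (fun best wp =>
            if wp.2 < best && pvStartsAt cs i wp.1 then wp.2 else best) best) b) = wp.2) := by
  induction idxs with
  | nil => intro b; simp
  | cons hd tl ih =>
    intro b
    simp only [List.foldl_cons]
    obtain ⟨g1, g2, g3⟩ := pv_inner_spec cs hd pvKeywordPrio b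
    obtain ⟨h1, h2, h3⟩ := ih (pvKeywordPrio.foldl (fun best wp =>
      if wp.2 < best && pvStartsAt cs hd wp.1 then wp.2 else best) b)
    refine ⟨le_trans h1 g1, ?_, ?_⟩
    · intro i hi wp hm hs
      rcases List.mem_cons.mp hi with hi | hi
      · subst hi; exact le_trans h1 (g2 wp hm hs)
      · exact h2 i hi wp hm hs
    · rcases h3 with h3 | ⟨i, hi, wp, hm, hs, he⟩
      · rw [h3]
        rcases g3 with g3 | ⟨wp, hm, hs, he⟩
        · exact Or.inl g3
        · exact Or.inr ⟨hd, List.mem_cons_self, wp, hm, hs, he⟩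
      · exact Or.inr ⟨i, List.mem_cons_of_mem _ hi, wp, hm, hs, he⟩

-- 'word in name' (A's test) ↔ some in-range position starts with word (B's test), word nonempty
theorem pv_match_iff (cs : List Char) (w : String) (hw : w.toList ≠ []) :
    (∃ i ∈ PySem.List.pyRange 0 (cs.length) 1, pvStartsAt cs i w = true) ↔
      PySem.Chars.isIn w.toList cs = true := by
  rw [← PySem.Chars.exists_prefix_drop_iff_isIn]
  constructor
  · rintro ⟨i, hi, hs⟩
    exact ⟨i.toNat, (PySem.Chars.startswith_iff _ _).mp hs⟩
  · rintro ⟨j, hj⟩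
    have hjlt : j < cs.length := by
      by_contra hge
      rw [List.drop_eq_nil_of_le (by omega)] at hj
      exact hw (List.prefix_nil.mp hj)
    refine ⟨(j : Int), ?_, ?_⟩
    · rw [PySem.List.mem_pyRange_one]
      constructor
      · positivity
      · exact_mod_cast hjlt
    · unfold pvStartsAt
      rw [PySem.Chars.startswith_iff]
      simpa using hj

-- ===== VERDICT (by name: the statement is the Claim_ definition above) =====
theorem generate_return_description_spec : Claim_equal_generate_return_description := by
  intro fn _
  unfold Spec_generate_return_description generate_return_description generate_return_description_alt
  simp only [List.any_cons, List.any_nil, Bool.or_eq_true, Bool.or_false]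
  set cs := (PySem.Str.lower fn).toList with hcs
  obtain ⟨h1, h2, h3⟩ := pv_outer_spec cs (PySem.List.pyRange 0 (cs.length) 1) 5
  have hFdef : pvScan cs = (PySem.List.pyRange 0 (cs.length) 1).foldl (fun best i =>
      pvKeywordPrio.foldl (fun best wp =>
        if wp.2 < best && pvStartsAt cs i wp.1 then wp.2 else best) best) 5 := rfl
  rw [← hFdef] at h1 h2 h3
  have hmatch : ∀ w : String, w.toList ≠ [] →
      ((∃ i ∈ PySem.List.pyRange 0 (cs.length) 1, pvStartsAt cs i w = true) ↔
        PySem.Str.isIn w (PySem.Str.lower fn) = true) := by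
    intro w hw
    rw [pv_match_iff cs w hw, PySem.Str.isIn, hcs]
  have mem_tbl : ∀ w p, (w, p) ∈ pvKeywordPrio →
      ((w = "create" ∨ w = "insert" ∨ w = "add") ∧ p = 0) ∨
      ((w = "get" ∨ w = "find" ∨ w = "search") ∧ p = 1) ∨
      ((w = "list" ∨ w = "all") ∧ p = 2) ∨
      ((w = "count" ∨ w = "size") ∧ p = 3) ∨
      ((w = "delete" ∨ w = "remove") ∧ p = 4) := by
    intro w p hm
    unfold pvKeywordPrio at hm
    fin_cases hm <;> simp
  have hub : ∀ w : String, ∀ p : Int, (w, p) ∈ pvKeywordPrio →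
      PySem.Str.isIn w (PySem.Str.lower fn) = true → pvScan cs ≤ p := by
    intro w p hm hin
    have hw : w.toList ≠ [] := by
      rcases mem_tbl _ _ hm with ⟨hw, _⟩ | ⟨hw, _⟩ | ⟨hw, _⟩ | ⟨hw, _⟩ | ⟨hw, _⟩ <;>
        first
        | (rcases hw with hw | hw | hw <;> subst hw <;> decide)
        | (rcases hw with hw | hw <;> subst hw <;> decide)
    obtain ⟨i, hi, hs⟩ := (hmatch w hw).mpr hin
    exact h2 i hi (w, p) hm hs
  have hex : pvScan cs = 5 ∨ ∃ w p, (w, p) ∈ pvKeywordPrio ∧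
      PySem.Str.isIn w (PySem.Str.lower fn) = true ∧ pvScan cs = p := by
    rcases h3 with h3 | ⟨i, hi, wp, hm, hs, he⟩
    · exact Or.inl h3
    · refine Or.inr ⟨wp.1, wp.2, hm, ?_, he⟩
      have hw : wp.1.toList ≠ [] := by
        rcases mem_tbl _ _ hm with ⟨hw, _⟩ | ⟨hw, _⟩ | ⟨hw, _⟩ | ⟨hw, _⟩ | ⟨hw, _⟩ <;>
          first
          | (rcases hw with hw | hw | hw <;> rw [hw] <;> decide)
          | (rcases hw with hw | hw <;> rw [hw] <;> decide)
      exact (hmatch wp.1 hw).mp ⟨i, hi, hs⟩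
  clear h1 h2 h3 hmatch hFdef
  split_ifs with c0 c1 c2 c3 c4
  · -- group 0 matched: pvScan = 0
    have hle : pvScan cs ≤ 0 := by
      rcases c0 with h | h | h <;> exact hub _ 0 (by decide) h
    have heq : pvScan cs = 0 := by
      rcases hex with h5 | ⟨w, p, hm, hin, hp⟩
      · omega
      · rcases mem_tbl w p hm with ⟨_, hp0⟩ | ⟨_, hp0⟩ | ⟨_, hp0⟩ | ⟨_, hp0⟩ | ⟨_, hp0⟩ <;> omega
    rw [heq]; rfl
  · -- group 1 matched, group 0 not: pvScan = 1
    have hle : pvScan cs ≤ 1 := by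
      rcases c1 with h | h | h <;> exact hub _ 1 (by decide) h
    have heq : pvScan cs = 1 := by
      rcases hex with h5 | ⟨w, p, hm, hin, hp⟩
      · omega
      · rcases mem_tbl w p hm with ⟨hw, hp0⟩ | ⟨hw, hp0⟩ | ⟨hw, hp0⟩ | ⟨hw, hp0⟩ | ⟨hw, hp0⟩
        · exfalso; rcases hw with hw | hw | hw <;> subst hw
          exacts [c0 (Or.inl hin), c0 (Or.inr (Or.inl hin)), c0 (Or.inr (Or.inr hin))]
        all_goals omega
    rw [heq]; rfl
  · -- group 2 matched, groups 0-1 not: pvScan = 2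
    have hle : pvScan cs ≤ 2 := by
      rcases c2 with h | h <;> exact hub _ 2 (by decide) h
    have heq : pvScan cs = 2 := by
      rcases hex with h5 | ⟨w, p, hm, hin, hp⟩
      · omega
      · rcases mem_tbl w p hm with ⟨hw, hp0⟩ | ⟨hw, hp0⟩ | ⟨hw, hp0⟩ | ⟨hw, hp0⟩ | ⟨hw, hp0⟩
        · exfalso; rcases hw with hw | hw | hw <;> subst hw
          exacts [c0 (Or.inl hin), c0 (Or.inr (Or.inl hin)), c0 (Or.inr (Or.inr hin))]
        · exfalso; rcases hw with hw | hw | hw <;> subst hw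
          exacts [c1 (Or.inl hin), c1 (Or.inr (Or.inl hin)), c1 (Or.inr (Or.inr hin))]
        all_goals omega
    rw [heq]; rfl
  · -- group 3 matched, groups 0-2 not: pvScan = 3
    have hle : pvScan cs ≤ 3 := by
      rcases c3 with h | h <;> exact hub _ 3 (by decide) h
    have heq : pvScan cs = 3 := by
      rcases hex with h5 | ⟨w, p, hm, hin, hp⟩
      · omega
      · rcases mem_tbl w p hm with ⟨hw, hp0⟩ | ⟨hw, hp0⟩ | ⟨hw, hp0⟩ | ⟨hw, hp0⟩ | ⟨hw, hp0⟩
        · exfalso; rcases hw with hw | hw | hw <;> subst hw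
          exacts [c0 (Or.inl hin), c0 (Or.inr (Or.inl hin)), c0 (Or.inr (Or.inr hin))]
        · exfalso; rcases hw with hw | hw | hw <;> subst hw
          exacts [c1 (Or.inl hin), c1 (Or.inr (Or.inl hin)), c1 (Or.inr (Or.inr hin))]
        · exfalso; rcases hw with hw | hw <;> subst hw
          exacts [c2 (Or.inl hin), c2 (Or.inr hin)]
        all_goals omega
    rw [heq]; rfl
  · -- group 4 matched, groups 0-3 not: pvScan = 4
    have hle : pvScan cs ≤ 4 := by
      rcases c4 with h | h <;> exact hub _ 4 (by decide) h
    have heq : pvScan cs = 4 := by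
      rcases hex with h5 | ⟨w, p, hm, hin, hp⟩
      · omega
      · rcases mem_tbl w p hm with ⟨hw, hp0⟩ | ⟨hw, hp0⟩ | ⟨hw, hp0⟩ | ⟨hw, hp0⟩ | ⟨hw, hp0⟩
        · exfalso; rcases hw with hw | hw | hw <;> subst hw
          exacts [c0 (Or.inl hin), c0 (Or.inr (Or.inl hin)), c0 (Or.inr (Or.inr hin))]
        · exfalso; rcases hw with hw | hw | hw <;> subst hw
          exacts [c1 (Or.inl hin), c1 (Or.inr (Or.inl hin)), c1 (Or.inr (Or.inr hin))]
        · exfalso; rcases hw with hw | hw <;> subst hw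
          exacts [c2 (Or.inl hin), c2 (Or.inr hin)]
        · exfalso; rcases hw with hw | hw <;> subst hw
          exacts [c3 (Or.inl hin), c3 (Or.inr hin)]
        all_goals omega
    rw [heq]; rfl
  · -- nothing matched: pvScan = 5
    have heq : pvScan cs = 5 := by
      rcases hex with h5 | ⟨w, p, hm, hin, hp⟩
      · exact h5
      · exfalso
        rcases mem_tbl w p hm with ⟨hw, _⟩ | ⟨hw, _⟩ | ⟨hw, _⟩ | ⟨hw, _⟩ | ⟨hw, _⟩
        · rcases hw with hw | hw | hw <;> subst hw
          exacts [c0 (Or.inl hin), c0 (Or.inr (Or.inl hin)), c0 (Or.inr (Or.inr hin))]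
        · rcases hw with hw | hw | hw <;> subst hw
          exacts [c1 (Or.inl hin), c1 (Or.inr (Or.inl hin)), c1 (Or.inr (Or.inr hin))]
        · rcases hw with hw | hw <;> subst hw
          exacts [c2 (Or.inl hin), c2 (Or.inr hin)]
        · rcases hw with hw | hw <;> subst hw
          exacts [c3 (Or.inl hin), c3 (Or.inr hin)]
        · rcases hw with hw | hw <;> subst hw
          exacts [c4 (Or.inl hin), c4 (Or.inr hin)]
    rw [heq]; rfl
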